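-- pv_equiv track=rewrite | github.com/codesquad-backend-study/algorithm-study | programmers/Hyun/week44/카드 짝 맞추기.py | move_cost
-- ===== SOURCE A (Python) =====
-- import collections
--
-- def move_cost(board, start, end):
--     if start == end:
--         return 0
--
--     queue, visit = collections.deque([[start[0], start[1], 0]]), {start}
--     while queue:
--         x, y, c = queue.popleft()
--         for dx, dy in [(0, 1), (0, -1), (1, 0), (-1, 0)]:
--             nx, ny = x + dx, y + dy  # normal move
--             cx, cy = x, y
--             while True:  # Ctrl + move
--                 cx, cy = cx + dx, cy + dy
--                 if not (0 <= cx <= 3 and 0 <= cy <= 3):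
--                     cx, cy = cx - dx, cy - dy
--                     break
--                 elif board[cx][cy] != 0:
--                     break
--
--             if (nx, ny) == end or (cx, cy) == end:
--                 return c + 1
--
--             if (0 <= nx <= 3 and 0 <= ny <= 3) and (nx, ny) not in visit:
--                 queue.append((nx, ny, c + 1))
--                 visit.add((nx, ny))
--             if (cx, cy) not in visit:
--                 queue.append((cx, cy, c + 1))
--                 visit.add((cx, cy))
-- ===== SOURCE B (Python) =====
-- import collections
--
-- def _slide(board, x, y, dx, dy):
--     # Ctrl+move: slide one step at a time until the next cell is off-board
--     # (stay) or holds a card (land on it).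
--     tx, ty = x + dx, y + dy
--     if not (0 <= tx <= 3 and 0 <= ty <= 3):
--         return (x, y)
--     if board[tx][ty] != 0:
--         return (tx, ty)
--     return _slide(board, tx, ty, dx, dy)
--
-- def _cands(board, x, y):
--     # candidate moves from (x, y): for each direction the one-step target
--     # (enqueueable only when on-board) and the Ctrl-slide target.
--     out = []
--     for dx, dy in ((0, 1), (0, -1), (1, 0), (-1, 0)):
--         out.append(((x + dx, y + dy), 0 <= x + dx <= 3 and 0 <= y + dy <= 3))
--         out.append((_slide(board, x, y, dx, dy), True))
--     return out
--
-- def move_cost(board, start, end):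
--     if start == end:
--         return 0
--     # plain BFS with a distance dict over the candidate graph; a candidate
--     # counts as a hit on `end` even when it is not enqueueable
--     dist = {start: 0}
--     queue = collections.deque([start])
--     while queue:
--         u = queue.popleft()
--         for v, ok in _cands(board, u[0], u[1]):
--             if v == end:
--                 return dist[u] + 1
--             if ok and v not in dist:
--                 dist[v] = dist[u] + 1
--                 queue.append(v)
--     return None
-- ===== Notes on version B (the rewrite author's own statement) =====
-- stated objective: simpler
-- what changed: B separates board geometry from the search: a helper builds each cell's candidate list (one-step targets flagged enqueueable-if-on-board, plus recursive Ctrl-slide targets) and a standard distance-dict BFS scans those lists uniformly, replacing A's queue of (x,y,cost) triples with an inline slide loop, a visit set and a per-direction double end-check.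
-- outside the precondition, e.g. on move_cost([[2]], (2, 4), (2, 5)): A returns 1, B raises IndexError
import Mathlib
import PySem

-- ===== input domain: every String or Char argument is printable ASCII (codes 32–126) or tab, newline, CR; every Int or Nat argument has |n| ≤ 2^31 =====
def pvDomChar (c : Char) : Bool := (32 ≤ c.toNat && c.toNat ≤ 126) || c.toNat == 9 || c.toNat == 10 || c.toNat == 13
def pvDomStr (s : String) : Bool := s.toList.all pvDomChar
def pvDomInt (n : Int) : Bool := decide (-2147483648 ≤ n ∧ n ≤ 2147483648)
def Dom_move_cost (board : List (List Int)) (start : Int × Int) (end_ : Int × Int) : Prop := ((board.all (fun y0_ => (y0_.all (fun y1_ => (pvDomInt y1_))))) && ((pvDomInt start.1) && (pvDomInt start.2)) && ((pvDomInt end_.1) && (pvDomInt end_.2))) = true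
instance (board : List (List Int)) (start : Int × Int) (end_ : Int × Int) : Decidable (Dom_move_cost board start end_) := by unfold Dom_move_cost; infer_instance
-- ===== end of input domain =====

-- B separates board geometry (a per-cell candidate list with enqueueable flags) from a standard
-- distance-dict BFS, replacing A's single loop with inline move expansion; objective: simpler decomposition, same cost.


-- ===== PORT A =====

-- 0 <= x <= 3 and 0 <= y <= 3
def pvInRA (x y : Int) : Bool := decide (0 ≤ x ∧ x ≤ 3 ∧ 0 ≤ y ∧ y ≤ 3)

-- board[x][y]; exact on Pre_ (only read at 0 ≤ x,y ≤ 3, and on Pre_ every cell A actually reads exists — Python raises IndexError otherwise)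
def pvCellA (board : List (List Int)) (x y : Int) : Int :=
  (PySem.List.pyGet? ((PySem.List.pyGet? board x).getD []) y).getD 0

-- the inner 'while True' Ctrl-slide loop; it re-enters only while the new cell is inside the
-- 4×4 range, so it makes at most 5 steps on any input and fuel 8 is never exhausted (exact)
def pvCtrlA (board : List (List Int)) : Nat → Int → Int → Int → Int → Int × Int
  | 0, cx, cy, _, _ => (cx, cy)
  | f + 1, cx, cy, dx, dy =>
    if !pvInRA (cx + dx) (cy + dy) then (cx, cy)
    else if pvCellA board (cx + dx) (cy + dy) != 0 then (cx + dx, cy + dy)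
    else pvCtrlA board f (cx + dx) (cy + dy) dx dy

-- the 'for dx, dy in [...]' body: .inl r = the 'return c + 1' early exit, .inr = updated (queue, visit)
def pvInnerA (board : List (List Int)) (end_ : Int × Int) (x y c : Int) :
    List (Int × Int) → List (Int × Int × Int) → PySem.Set (Int × Int) →
    Sum Int (List (Int × Int × Int) × PySem.Set (Int × Int))
  | [], q, v => .inr (q, v)
  | d :: ds, q, v =>
    let n : Int × Int := (x + d.1, y + d.2)
    let t := pvCtrlA board 8 x y d.1 d.2
    if n = end_ ∨ t = end_ then .inl (c + 1)
    else
      let s1 := if pvInRA n.1 n.2 && !(PySem.Set.contains v n) then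
          (q ++ [(n.1, n.2, c + 1)], PySem.Set.add v n) else (q, v)
      let s2 := if !(PySem.Set.contains s1.2 t) then
          (s1.1 ++ [(t.1, t.2, c + 1)], PySem.Set.add s1.2 t) else s1
      pvInnerA board end_ x y c ds s2.1 s2.2

-- the 'while queue' loop; every enqueue also grows visit, and visit only ever holds start plus
-- in-range cells (≤ 17 elements), so at most 17 iterations occur and fuel 100 is never exhausted (exact)
def pvLoopA (board : List (List Int)) (end_ : Int × Int) :
    Nat → List (Int × Int × Int) → PySem.Set (Int × Int) → Option Int
  | 0, _, _ => none
  | _ + 1, [], _ => none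
  | f + 1, (x, y, c) :: q, v =>
    match pvInnerA board end_ x y c [(0, 1), (0, -1), (1, 0), (-1, 0)] q v with
    | .inl r => some r
    | .inr s => pvLoopA board end_ f s.1 s.2

def move_cost (board : List (List Int)) (start : Int × Int) (end_ : Int × Int) : Option Int :=
  if start = end_ then some 0
  else pvLoopA board end_ 100 [(start.1, start.2, 0)] (PySem.Set.ofList [start])

-- ===== PORT B =====

def pvInRB (x y : Int) : Bool := decide (0 ≤ x ∧ x ≤ 3 ∧ 0 ≤ y ∧ y ≤ 3)

-- board[x][y]; exact on Pre_ (see pvCellA)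
def pvCellB (board : List (List Int)) (x y : Int) : Int :=
  (PySem.List.pyGet? ((PySem.List.pyGet? board x).getD []) y).getD 0

-- Source B's recursive _slide; recursion re-enters only inside the 4×4 range, depth ≤ 5, fuel 8 exact
def pvSlideB (board : List (List Int)) : Nat → Int → Int → Int → Int → Int × Int
  | 0, x, y, _, _ => (x, y)
  | f + 1, x, y, dx, dy =>
    if !pvInRB (x + dx) (y + dy) then (x, y)
    else if pvCellB board (x + dx) (y + dy) != 0 then (x + dx, y + dy)
    else pvSlideB board f (x + dx) (y + dy) dx dy

-- Source B's _cands: the candidate list of one cell, each with its 'enqueueable' flag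
def pvCandsB (board : List (List Int)) (x y : Int) : List ((Int × Int) × Bool) :=
  [((0 : Int), (1 : Int)), (0, -1), (1, 0), (-1, 0)].foldl (fun out d =>
    (out ++ [((x + d.1, y + d.2), pvInRB (x + d.1) (y + d.2))]) ++
      [(pvSlideB board 8 x y d.1 d.2, true)]) []

-- the 'for v, ok in _cands(...)' body: .inl = early return, .inr = updated (queue, dist)
def pvScanB (end_ : Int × Int) (du : Int) :
    List ((Int × Int) × Bool) → List (Int × Int) → PySem.Dict (Int × Int) Int →
    Sum Int (List (Int × Int) × PySem.Dict (Int × Int) Int)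
  | [], q, dist => .inr (q, dist)
  | vo :: vs, q, dist =>
    if vo.1 = end_ then .inl (du + 1)
    else if vo.2 && (PySem.Dict.get? dist vo.1).isNone then
      pvScanB end_ du vs (q ++ [vo.1]) (PySem.Dict.insert dist vo.1 (du + 1))
    else pvScanB end_ du vs q dist

-- the BFS 'while queue' loop; ≤ 17 cells ever enter dist, fuel 100 never exhausted (exact)
def pvLoopB (board : List (List Int)) (end_ : Int × Int) :
    Nat → List (Int × Int) → PySem.Dict (Int × Int) Int → Option Int
  | 0, _, _ => none
  | _ + 1, [], _ => none
  | f + 1, u :: q, dist =>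
    -- dist[u]: u always has an entry when popped, so the default is never read (no KeyError)
    let du := (PySem.Dict.get? dist u).getD 0
    match pvScanB end_ du (pvCandsB board u.1 u.2) q dist with
    | .inl r => some r
    | .inr s => pvLoopB board end_ f s.1 s.2

def move_cost_alt (board : List (List Int)) (start : Int × Int) (end_ : Int × Int) : Option Int :=
  if start = end_ then some 0
  else pvLoopB board end_ 100 [start]
    (PySem.Dict.insert PySem.Dict.empty start 0)

-- ===== PRECONDITION & SPEC =====

-- Pre_ admits start = end (answered before any board access), boards with a full 4×4 prefix
-- (no board read can then raise), and starts so far off the board that no move ever touches a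
-- cell (neither program reads the board). It excludes the remaining ragged boards: there
-- Python A raises IndexError whenever its search reads a missing cell, and B's per-cell
-- candidate builder slides all four directions of a popped cell before B's end-check, so B can
-- raise IndexError where A's interleaved end-check happens to return first (see the cite).
def Pre_move_cost (board : List (List Int)) (start : Int × Int) (end_ : Int × Int) : Prop :=
  start = end_ ∨
  (4 ≤ board.length ∧ ∀ r ∈ board.take 4, 4 ≤ r.length) ∨
  (¬(0 ≤ start.1 ∧ start.1 ≤ 3 ∧ -1 ≤ start.2 ∧ start.2 ≤ 4) ∧
   ¬(0 ≤ start.2 ∧ start.2 ≤ 3 ∧ -1 ≤ start.1 ∧ start.1 ≤ 4))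

instance (board : List (List Int)) (start : Int × Int) (end_ : Int × Int) :
    Decidable (Pre_move_cost board start end_) := by unfold Pre_move_cost; infer_instance

def pvWitness_move_cost : List (List Int) × (Int × Int) × (Int × Int) :=
  ([[1, 0, 0, 2], [0, 0, 0, 0], [0, 3, 0, 0], [0, 0, 0, 1]], (0, 0), (3, 3))

def Spec_move_cost (board : List (List Int)) (start : Int × Int) (end_ : Int × Int) (out : Option Int) : Prop := out = move_cost_alt board start end_
instance (board : List (List Int)) (start : Int × Int) (end_ : Int × Int) (out : Option Int) : Decidable (Spec_move_cost board start end_ out) := by unfold Spec_move_cost; infer_instance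

-- ===== CLAIM (what is proved, stated in full; the proofs are below) =====
def Claim_equal_move_cost : Prop := ∀ (board : List (List Int)) (start : Int × Int) (end_ : Int × Int), Dom_move_cost board start end_ → Pre_move_cost board start end_ → Spec_move_cost board start end_ (move_cost board start end_)

-- ===== LEMMAS AND PROOFS =====

-- one direction's slice of B's candidate list
def pvChunk (board : List (List Int)) (x y : Int) (d : Int × Int) : List ((Int × Int) × Bool) :=
  [((x + d.1, y + d.2), pvInRB (x + d.1) (y + d.2)), (pvSlideB board 8 x y d.1 d.2, true)]

-- the lockstep invariant between A's (queue, visit) and B's (queue, dist)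
def pvCorr (qA : List (Int × Int × Int)) (v : PySem.Set (Int × Int))
    (qB : List (Int × Int)) (dist : PySem.Dict (Int × Int) Int) : Prop :=
  qB = qA.map (fun e => (e.1, e.2.1)) ∧
  (∀ a b cc, (a, b, cc) ∈ qA → PySem.Dict.get? dist (a, b) = some cc) ∧
  (∀ p : Int × Int, PySem.Set.contains v p = (PySem.Dict.get? dist p).isSome)

theorem pvInR_AB (a b : Int) : pvInRA a b = pvInRB a b := rfl

theorem pvCtrl_eq_slide (board : List (List Int)) :
    ∀ (f : Nat) (x y dx dy : Int), pvCtrlA board f x y dx dy = pvSlideB board f x y dx dy := by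
  intro f
  induction f with
  | zero => intro x y dx dy; rfl
  | succ f ih =>
    intro x y dx dy
    simp only [pvCtrlA, pvSlideB, pvInRA, pvInRB, pvCellA, pvCellB]
    split <;> [rfl; skip]
    split <;> [rfl; exact ih _ _ _ _]

theorem pvCands_eq_flatMap (board : List (List Int)) (x y : Int) :
    pvCandsB board x y =
      [((0 : Int), (1 : Int)), (0, -1), (1, 0), (-1, 0)].flatMap (pvChunk board x y) := by
  simp [pvCandsB, pvChunk, List.foldl]

theorem pvScan_append (end_ : Int × Int) (du : Int) :
    ∀ (l1 l2 : List ((Int × Int) × Bool)) (q : List (Int × Int)) (dist : PySem.Dict (Int × Int) Int),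
      pvScanB end_ du (l1 ++ l2) q dist =
        match pvScanB end_ du l1 q dist with
        | .inl r => .inl r
        | .inr s => pvScanB end_ du l2 s.1 s.2 := by
  intro l1
  induction l1 with
  | nil => intro l2 q dist; rfl
  | cons v vs ih =>
    intro l2 q dist
    simp only [List.cons_append, pvScanB]
    split
    · rfl
    · split
      · exact ih _ _ _
      · exact ih _ _ _

-- visit/dist stay in lockstep when one fresh candidate is enqueued on both sides
theorem pvCorr_push (qA : List (Int × Int × Int)) (v : PySem.Set (Int × Int))
    (qB : List (Int × Int)) (dist : PySem.Dict (Int × Int) Int)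
    (hc : pvCorr qA v qB dist) (p : Int × Int) (w : Int)
    (habs : PySem.Dict.get? dist p = none) :
    pvCorr (qA ++ [(p.1, p.2, w)]) (PySem.Set.add v p) (qB ++ [p])
      (PySem.Dict.insert dist p w) := by
  obtain ⟨hc1, hc2, hc3⟩ := hc
  have hcv : PySem.Set.contains v p = false := by rw [hc3, habs]; rfl
  refine ⟨by simp [hc1], ?_, ?_⟩
  · intro a b cc hm
    rcases List.mem_append.1 hm with hm | hm
    · have hold := hc2 a b cc hm
      rw [PySem.Dict.get?_insert]
      have hne : (a, b) ≠ p := by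
        intro hEq; rw [hEq, habs] at hold; simp at hold
      rw [if_neg hne]; exact hold
    · have hm' : (a, b, cc) = (p.1, p.2, w) := List.mem_singleton.1 hm
      have ha : a = p.1 := congrArg Prod.fst hm'
      have hb : b = p.2 := congrArg Prod.fst (congrArg Prod.snd hm')
      have hcc : cc = w := congrArg Prod.snd (congrArg Prod.snd hm')
      subst ha; subst hb; subst hcc
      have hpe : ((p.1 : Int), (p.2 : Int)) = p := rfl
      rw [hpe, PySem.Dict.get?_insert_self]
  · intro p'
    have hnm : p ∉ v := by simpa [PySem.Set.contains] using hcv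
    rw [PySem.Dict.get?_insert]
    by_cases hp' : p' = p
    · subst hp'
      simp [PySem.Set.add, PySem.Set.contains, hnm]
    · rw [if_neg hp', ← hc3]
      simp [PySem.Set.add, PySem.Set.contains, hnm, hp']

theorem pvInner_corr (board : List (List Int)) (end_ : Int × Int) (x y c : Int) :
    ∀ (ds : List (Int × Int)) (qA : List (Int × Int × Int)) (v : PySem.Set (Int × Int))
      (qB : List (Int × Int)) (dist : PySem.Dict (Int × Int) Int),
      pvCorr qA v qB dist →
      ((∃ r, pvInnerA board end_ x y c ds qA v = .inl r ∧
             pvScanB end_ c (ds.flatMap (pvChunk board x y)) qB dist = .inl r) ∨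
       (∃ qA' v' qB' dist', pvInnerA board end_ x y c ds qA v = .inr (qA', v') ∧
             pvScanB end_ c (ds.flatMap (pvChunk board x y)) qB dist = .inr (qB', dist') ∧
             pvCorr qA' v' qB' dist')) := by
  intro ds
  induction ds with
  | nil => intro qA v qB dist hc; right; exact ⟨qA, v, qB, dist, rfl, rfl, hc⟩
  | cons d ds ih =>
    intro qA v qB dist hc
    have hc3 := hc.2.2
    rw [List.flatMap_cons, pvScan_append]
    simp only [pvInnerA, pvCtrl_eq_slide, pvChunk]
    set n : Int × Int := (x + d.1, y + d.2) with hn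
    set t : Int × Int := pvSlideB board 8 x y d.1 d.2 with ht
    by_cases hend : n = end_ ∨ t = end_
    · -- A returns c + 1; show B's scan of this chunk also returns c + 1
      rw [if_pos hend]
      left; refine ⟨c + 1, rfl, ?_⟩
      by_cases hne : n = end_
      · simp [pvScanB, hne]
      · have hte : t = end_ := hend.resolve_left hne
        simp [pvScanB, hne, hte]
    · -- no early return on this direction: push the candidates and recurse
      rw [if_neg hend]
      rw [not_or] at hend
      obtain ⟨hne, hte⟩ := hend
      -- step 1: the normal move n
      have hstep1 : ∃ qA1 v1 qB1 dist1,
          ((if pvInRA n.1 n.2 && !(PySem.Set.contains v n) then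
              (qA ++ [(n.1, n.2, c + 1)], PySem.Set.add v n) else (qA, v)) = (qA1, v1)) ∧
          (pvScanB end_ c [(n, pvInRB n.1 n.2), (t, true)] qB dist =
             pvScanB end_ c [(t, true)] qB1 dist1) ∧ pvCorr qA1 v1 qB1 dist1 := by
        simp only [pvScanB, if_neg hne]
        by_cases hcond : (pvInRB n.1 n.2 && (PySem.Dict.get? dist n).isNone) = true
        · have hsplit : pvInRB n.1 n.2 = true ∧ (PySem.Dict.get? dist n).isNone = true := by
            simpa using hcond
          have hnr : pvInRB n.1 n.2 = true := hsplit.1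
          have habs : PySem.Dict.get? dist n = none := by
            simpa [Option.isNone_iff_eq_none] using hsplit.2
          have hcv : PySem.Set.contains v n = false := by rw [hc3, habs]; rfl
          refine ⟨qA ++ [(n.1, n.2, c + 1)], PySem.Set.add v n, qB ++ [n],
            PySem.Dict.insert dist n (c + 1), ?_, ?_, ?_⟩
          · rw [if_pos (by rw [pvInR_AB, hnr, hcv]; rfl)]
          · rw [if_pos hcond]
          · exact pvCorr_push qA v qB dist hc n (c + 1) habs
        · refine ⟨qA, v, qB, dist, ?_, ?_, hc⟩
          · rw [if_neg ?_]
            intro hAB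
            apply hcond
            have hsplit : pvInRA n.1 n.2 = true ∧ PySem.Set.contains v n = false := by
              simpa using hAB
            have h1 : pvInRB n.1 n.2 = true := by
              have := hsplit.1; rwa [pvInR_AB] at this
            have h2 : (PySem.Dict.get? dist n).isSome = false := by
              rw [← hc3]; exact hsplit.2
            have hnone : PySem.Dict.get? dist n = none :=
              Option.not_isSome_iff_eq_none.1 (by simp [h2])
            simp [h1, hnone]
          · rw [if_neg hcond]
      obtain ⟨qA1, v1, qB1, dist1, hA1, hB1, hc1⟩ := hstep1
      rw [hA1, hB1]
      -- step 2: the slide target t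
      have hc13 := hc1.2.2
      have hstep2 : ∃ qA2 v2 qB2 dist2,
          ((if !(PySem.Set.contains v1 t) then
              (qA1 ++ [(t.1, t.2, c + 1)], PySem.Set.add v1 t) else (qA1, v1)) = (qA2, v2)) ∧
          (pvScanB end_ c [(t, true)] qB1 dist1 = .inr (qB2, dist2)) ∧
          pvCorr qA2 v2 qB2 dist2 := by
        simp only [pvScanB, if_neg hte, Bool.true_and]
        by_cases habs : PySem.Dict.get? dist1 t = none
        · have hcv : PySem.Set.contains v1 t = false := by rw [hc13, habs]; rfl
          refine ⟨qA1 ++ [(t.1, t.2, c + 1)], PySem.Set.add v1 t, qB1 ++ [t],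
            PySem.Dict.insert dist1 t (c + 1), ?_, ?_, ?_⟩
          · rw [if_pos (by rw [hcv]; rfl)]
          · rw [if_pos (by rw [habs]; rfl)]
          · exact pvCorr_push qA1 v1 qB1 dist1 hc1 t (c + 1) habs
        · have hcv : PySem.Set.contains v1 t = true := by
            rw [hc13]; exact Option.isSome_iff_ne_none.2 habs
          refine ⟨qA1, v1, qB1, dist1, ?_, ?_, hc1⟩
          · rw [if_neg (by rw [hcv]; simp)]
          · rw [if_neg (by simpa using habs)]
      obtain ⟨qA2, v2, qB2, dist2, hA2, hB2, hc2⟩ := hstep2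
      rw [hA2, hB2]
      exact ih qA2 v2 qB2 dist2 hc2

theorem pvLoop_corr (board : List (List Int)) (end_ : Int × Int) :
    ∀ (f : Nat) (qA : List (Int × Int × Int)) (v : PySem.Set (Int × Int))
      (qB : List (Int × Int)) (dist : PySem.Dict (Int × Int) Int),
      pvCorr qA v qB dist →
      pvLoopA board end_ f qA v = pvLoopB board end_ f qB dist := by
  intro f
  induction f with
  | zero => intro qA v qB dist _; rfl
  | succ f ih =>
    intro qA v qB dist hc
    obtain ⟨hc1, hc2, hc3⟩ := hc
    match qA, hc1 with
    | [], hc1 =>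
      subst hc1; rfl
    | (x, y, c) :: q, hc1 =>
      subst hc1
      have hdu : PySem.Dict.get? dist (x, y) = some c := hc2 x y c List.mem_cons_self
      have hctail : pvCorr q v (q.map (fun e => (e.1, e.2.1))) dist :=
        ⟨rfl, fun a b cc hm => hc2 a b cc (List.mem_cons_of_mem _ hm), hc3⟩
      simp only [pvLoopA, pvLoopB, List.map_cons, hdu, Option.getD_some, pvCands_eq_flatMap]
      rcases pvInner_corr board end_ x y c
          [(0, 1), (0, -1), (1, 0), (-1, 0)] q v (q.map (fun e => (e.1, e.2.1))) dist hctail with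
        ⟨r, hA, hB⟩ | ⟨qA', v', qB', dist', hA, hB, hc'⟩
      · rw [hA, hB]
      · rw [hA, hB]
        exact ih qA' v' qB' dist' hc'

-- ===== VERDICT (by name: the statement is the Claim_ definition above) =====
theorem move_cost_spec : Claim_equal_move_cost := by
  intro board start end_ _ _
  unfold Spec_move_cost
  by_cases hse : start = end_
  · simp [move_cost, move_cost_alt, hse]
  · simp only [move_cost, move_cost_alt, if_neg hse]
    apply pvLoop_corr board end_
    refine ⟨rfl, ?_, ?_⟩
    · intro a b cc hm
      simp only [List.mem_singleton] at hm
      have ha : a = start.1 := congrArg Prod.fst hm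
      have hb : b = start.2 := congrArg Prod.fst (congrArg Prod.snd hm)
      have hcc : cc = 0 := congrArg Prod.snd (congrArg Prod.snd hm)
      subst ha; subst hb; subst hcc
      have : ((start.1 : Int), (start.2 : Int)) = start := rfl
      rw [this, PySem.Dict.get?_insert_self]
    · intro p
      rw [PySem.Dict.get?_insert]
      by_cases hp : p = start
      · subst hp
        simp [PySem.Set.ofList, PySem.Set.add, PySem.Set.contains, PySem.Set.empty]
      · rw [if_neg hp]
        simp [PySem.Set.ofList, PySem.Set.add, PySem.Set.contains, PySem.Set.empty,
          PySem.Dict.get?_empty, hp]
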